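-- pv_equiv track=rewrite | github.com/luiscarlin/advent-of-code | day7/day7.py | assign_work
-- ===== SOURCE A (Python) =====
-- def get_step_time(letter):
--   return ord(letter) - 4
--
-- def has_prereqs(vertex, prereqs):
--   return not prereqs[vertex] == []
--
-- def assign_work(number_workers, current_work, available_vertices, prerequisites):
--   available_vertices = sorted(list(set(available_vertices)))
--
--   if (len(current_work)) == number_workers:
--     return current_work, available_vertices
--
--   for possible_step in list(available_vertices):
--     if has_prereqs(possible_step, prerequisites):
--       continue
--
--     if len(current_work) < number_workers:
--       current_work[possible_step] = get_step_time(possible_step)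
--       available_vertices.remove(possible_step)
--
--   return current_work, available_vertices
-- ===== SOURCE B (Python) =====
-- def get_step_time(letter):
--   return ord(letter) - 4
--
-- def assign_work(number_workers, current_work, available_vertices, prerequisites):
--   available = sorted(set(available_vertices))
--   if len(current_work) == number_workers:
--     return current_work, available
--   ready = [v for v in available if prerequisites[v] == []]
--   taken = ready[:max(0, number_workers - len(current_work))]
--   for v in taken:
--     current_work[v] = get_step_time(v)
--   return current_work, [v for v in available if v not in taken]
-- ===== Notes on version B (the rewrite author's own statement) =====
-- stated objective: simpler
-- what changed: Replaces A's per-element capacity-guarded loop with mid-loop list.remove mutation by an upfront filter of prerequisite-free steps, a clamped slice taken for assignment, and one comprehension for the remaining steps (keeping the workers-full early return).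
import Mathlib
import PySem

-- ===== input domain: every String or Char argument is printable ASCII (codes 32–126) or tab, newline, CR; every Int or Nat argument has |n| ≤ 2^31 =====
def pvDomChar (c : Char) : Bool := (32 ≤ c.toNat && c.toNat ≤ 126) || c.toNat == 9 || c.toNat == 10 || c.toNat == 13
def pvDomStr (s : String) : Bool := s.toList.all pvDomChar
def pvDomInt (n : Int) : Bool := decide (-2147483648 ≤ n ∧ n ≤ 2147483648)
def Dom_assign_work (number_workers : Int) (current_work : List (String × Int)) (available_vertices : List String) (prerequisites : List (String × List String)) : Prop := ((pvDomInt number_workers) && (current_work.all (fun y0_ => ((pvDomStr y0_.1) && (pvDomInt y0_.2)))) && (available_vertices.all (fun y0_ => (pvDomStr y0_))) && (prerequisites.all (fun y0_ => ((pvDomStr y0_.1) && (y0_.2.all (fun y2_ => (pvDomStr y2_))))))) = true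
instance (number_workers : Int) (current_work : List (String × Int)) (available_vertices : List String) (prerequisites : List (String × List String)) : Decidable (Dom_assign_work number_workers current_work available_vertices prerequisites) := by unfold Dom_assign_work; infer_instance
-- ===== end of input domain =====

-- B replaces A's per-element capacity guard and mid-loop list surgery by an upfront
-- filter/clamp/slice (objective: simpler).  Both Pythons mutate current_work in place
-- with the same final contents; the equivalence proved here is about the return value.

-- ===== PORT A =====
-- ord(letter) - 4; Python raises TypeError unless letter has exactly one character
-- (Pre_ guarantees that for every string this is applied to; the [] and multi-char
-- fallbacks below are unreachable inside Pre_).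
def pvGetStepTime (letter : String) : Int :=
  match letter.toList with
  | c :: _ => (c.toNat : Int) - 4
  | [] => 0

-- not prereqs[vertex] == []; a missing key is a KeyError in Python (excluded by Pre_,
-- where the .getD [] fallback is never taken).
def pvHasPrereqs (vertex : String) (prereqs : PySem.Dict String (List String)) : Bool :=
  !(((prereqs.get? vertex).getD []) == ([] : List String))

def assign_work (number_workers : Int) (current_work : List (String × Int)) (available_vertices : List String) (prerequisites : List (String × List String)) : (List (String × Int)) × List String :=
  let av := PySem.List.sorted (PySem.Set.ofList available_vertices) (fun x => x) false
  let cw := PySem.Dict.mk current_work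
  let pr := PySem.Dict.mk prerequisites
  if (cw.size : Int) = number_workers then (cw.items, av)
  else
    -- for possible_step in list(available_vertices): iterate over a copy (av), mutate the pair
    let st := av.foldl (fun (st : PySem.Dict String Int × List String) v =>
      if pvHasPrereqs v pr then st
      else if (st.1.size : Int) < number_workers then
        (st.1.insert v (pvGetStepTime v), (PySem.List.remove? st.2 v).getD st.2)
      else st) (cw, av)
    (st.1.items, st.2)

-- ===== PORT B =====
def assign_work_alt (number_workers : Int) (current_work : List (String × Int)) (available_vertices : List String) (prerequisites : List (String × List String)) : (List (String × Int)) × List String :=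
  let available := PySem.List.sorted (PySem.Set.ofList available_vertices) (fun x => x) false
  if (current_work.length : Int) = number_workers then (current_work, available)
  else
    let ready := available.filter (fun v => ((PySem.Dict.mk prerequisites).get? v).getD [] == ([] : List String))
    let taken := ready.take (max 0 (number_workers - (current_work.length : Int))).toNat
    let cw := taken.foldl (fun d v => d.insert v (pvGetStepTime v)) (PySem.Dict.mk current_work)
    (cw.items, available.filter (fun v => !(taken.contains v)))

-- ===== PRECONDITION & SPEC =====
-- Pre_ keeps the inputs where neither Python raises and nothing accidental happens: unless
-- A's early return fires, every available step must be a key of prerequisites (else KeyError);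
-- when workers are free, every step that actually gets assigned (prerequisite-free, with
-- fewer smaller prerequisite-free steps than free slots) must be a single character (ord
-- raises TypeError otherwise), and no prerequisite-free available step may already be a key
-- of current_work — on such overlaps A's capacity accounting depends accidentally on dict
-- overwrite not growing the dict.
def Pre_assign_work (number_workers : Int) (current_work : List (String × Int)) (available_vertices : List String) (prerequisites : List (String × List String)) : Prop :=
  ((current_work.length : Int) ≠ number_workers →
    ∀ v ∈ available_vertices, ((PySem.Dict.mk prerequisites).get? v).isSome) ∧
  ((current_work.length : Int) < number_workers →
    (∀ v ∈ available_vertices, (PySem.Dict.mk prerequisites).get? v = some [] →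
      ((((PySem.Set.ofList available_vertices).filter (fun w =>
          ((PySem.Dict.mk prerequisites).get? w).getD [] == ([] : List String) && w.toList < v.toList)).length : Int)
        < number_workers - (current_work.length : Int) → v.toList.length = 1) ∧
      (PySem.Dict.mk current_work).get? v = none))
instance (number_workers : Int) (current_work : List (String × Int)) (available_vertices : List String) (prerequisites : List (String × List String)) : Decidable (Pre_assign_work number_workers current_work available_vertices prerequisites) := by unfold Pre_assign_work; infer_instance

def pvWitness_assign_work : Int × (List (String × Int)) × List String × (List (String × List String)) :=
  (2, [("X", 5)], ["b", "a", "b"], [("a", []), ("b", ["a"])])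

def Spec_assign_work (number_workers : Int) (current_work : List (String × Int)) (available_vertices : List String) (prerequisites : List (String × List String)) (out : (List (String × Int)) × List String) : Prop := out = assign_work_alt number_workers current_work available_vertices prerequisites
instance (number_workers : Int) (current_work : List (String × Int)) (available_vertices : List String) (prerequisites : List (String × List String)) (out : (List (String × Int)) × List String) : Decidable (Spec_assign_work number_workers current_work available_vertices prerequisites out) := by unfold Spec_assign_work; infer_instance

-- ===== CLAIM (what is proved, stated in full; the proofs are below) =====
def Claim_equal_assign_work : Prop := ∀ (number_workers : Int) (current_work : List (String × Int)) (available_vertices : List String) (prerequisites : List (String × List String)), Dom_assign_work number_workers current_work available_vertices prerequisites → Pre_assign_work number_workers current_work available_vertices prerequisites → Spec_assign_work number_workers current_work available_vertices prerequisites (assign_work number_workers current_work available_vertices prerequisites)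

-- ===== LEMMAS AND PROOFS =====

-- A's loop, described in B's shape: starting from a dict whose keys avoid the
-- prerequisite-free elements of the nodup list L, the fold assigns exactly the first
-- (W − size) prerequisite-free elements of L and removes exactly those from the carried list.
theorem pvLoopEq (W : Int) (pr : PySem.Dict String (List String)) :
    ∀ (L : List String) (cw : PySem.Dict String Int) (avail : List String),
    L.Nodup →
    (∀ v ∈ L, ((pr.get? v).getD [] == ([] : List String)) = true → cw.get? v = none) →
    L.foldl (fun (st : PySem.Dict String Int × List String) v =>
        if pvHasPrereqs v pr then st
        else if (st.1.size : Int) < W then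
          (st.1.insert v (pvGetStepTime v), (PySem.List.remove? st.2 v).getD st.2)
        else st) (cw, avail)
    = ((((L.filter (fun v => (pr.get? v).getD [] == ([] : List String))).take
          (max 0 (W - (cw.size : Int))).toNat).foldl
          (fun d v => d.insert v (pvGetStepTime v)) cw),
       (((L.filter (fun v => (pr.get? v).getD [] == ([] : List String))).take
          (max 0 (W - (cw.size : Int))).toNat).foldl
          (fun a v => (PySem.List.remove? a v).getD a) avail)) := by
  intro L
  induction L with
  | nil => intro cw avail _ _; simp
  | cons v L ih =>
    intro cw avail hnd hfresh
    have hndL : L.Nodup := hnd.of_cons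
    have hvL : v ∉ L := (List.nodup_cons.mp hnd).1
    by_cases hready : ((pr.get? v).getD [] == ([] : List String)) = true
    · -- v has no prerequisites
      by_cases hcap : (cw.size : Int) < W
      · -- capacity left: v is assigned
        have hfv : cw.get? v = none := hfresh v (List.mem_cons_self) hready
        have hcont : cw.contains v = false := by
          rw [PySem.Dict.contains_eq_isSome_get?, hfv]; rfl
        have hsize : ((cw.insert v (pvGetStepTime v)).size : Int) = (cw.size : Int) + 1 := by
          rw [PySem.Dict.size_insert, hcont]; push_cast; simp
        have hfresh' : ∀ u ∈ L, ((pr.get? u).getD [] == ([] : List String)) = true →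
            (cw.insert v (pvGetStepTime v)).get? u = none := by
          intro u hu hu2
          rw [PySem.Dict.get?_insert_of_ne _ _ (by rintro rfl; exact hvL hu)]
          exact hfresh u (List.mem_cons_of_mem _ hu) hu2
        have htake : (max 0 (W - (cw.size : Int))).toNat
            = (max 0 (W - ((cw.insert v (pvGetStepTime v)).size : Int))).toNat + 1 := by
          rw [hsize]; omega
        have hhp : ¬ (pvHasPrereqs v pr = true) := by simp [pvHasPrereqs, hready]
        simp only [List.foldl_cons]
        rw [if_neg hhp, if_pos hcap, ih _ _ hndL hfresh']
        simp only [List.filter_cons, hready, if_true, htake, List.take_succ_cons, List.foldl_cons]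
      · -- workers full: nothing more is ever assigned
        have htz : (max 0 (W - (cw.size : Int))).toNat = 0 := by omega
        have hhp : ¬ (pvHasPrereqs v pr = true) := by simp [pvHasPrereqs, hready]
        simp only [List.foldl_cons]
        rw [if_neg hhp, if_neg hcap]
        rw [ih _ _ hndL (fun u hu hu2 => hfresh u (List.mem_cons_of_mem _ hu) hu2)]
        simp only [List.filter_cons, hready, if_true, htz, List.take_zero, List.foldl_nil]
    · -- v still has prerequisites: skipped
      have hhp : pvHasPrereqs v pr = true := by simp [pvHasPrereqs, hready]
      simp only [List.foldl_cons]
      rw [if_pos hhp]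
      rw [ih _ _ hndL (fun u hu hu2 => hfresh u (List.mem_cons_of_mem _ hu) hu2)]
      simp only [List.filter_cons, if_neg (show ¬ (((pr.get? v).getD [] == ([] : List String)) = true) from hready)]

-- removing the elements of t one by one from a duplicate-free list is filtering them out
theorem pvFoldRemoveEqFilter :
    ∀ (t a : List String), a.Nodup →
    t.foldl (fun a v => (PySem.List.remove? a v).getD a) a
      = a.filter (fun x => !(t.contains x)) := by
  intro t
  induction t with
  | nil => intro a _; simp
  | cons v t ih =>
    intro a hnd
    have hstep : (PySem.List.remove? a v).getD a = a.filter (fun x => x != v) := by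
      by_cases hv : v ∈ a
      · rw [PySem.List.remove?_eq_some_erase a v hv, Option.getD_some,
          List.Nodup.erase_eq_filter hnd]
      · rw [(PySem.List.remove?_eq_none_iff a v).mpr hv, Option.getD_none]
        exact (List.filter_eq_self.mpr (fun x hx => by
          simp only [bne_iff_ne, ne_eq]
          exact fun h => hv (h ▸ hx))).symm
    simp only [List.foldl_cons, hstep]
    rw [ih _ (hnd.filter _)]
    rw [List.filter_filter]
    apply List.filter_congr
    intro x _
    simp only [List.contains_cons, Bool.not_or, Bool.and_comm, bne, Bool.beq_comm]

-- once the workers are full the loop changes nothing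
theorem pvLoopFull (W : Int) (pr : PySem.Dict String (List String)) :
    ∀ (L : List String) (cw : PySem.Dict String Int) (avail : List String),
    ¬ ((cw.size : Int) < W) →
    L.foldl (fun (st : PySem.Dict String Int × List String) v =>
        if pvHasPrereqs v pr then st
        else if (st.1.size : Int) < W then
          (st.1.insert v (pvGetStepTime v), (PySem.List.remove? st.2 v).getD st.2)
        else st) (cw, avail) = (cw, avail) := by
  intro L
  induction L with
  | nil => intro cw avail _; rfl
  | cons v L ih =>
    intro cw avail hcap
    simp only [List.foldl_cons]
    by_cases hp : pvHasPrereqs v pr = true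
    · rw [if_pos hp]; exact ih cw avail hcap
    · rw [if_neg hp, if_neg hcap]; exact ih cw avail hcap

theorem assign_work_spec_aux (number_workers : Int) (current_work : List (String × Int)) (available_vertices : List String) (prerequisites : List (String × List String)) :
    Pre_assign_work number_workers current_work available_vertices prerequisites →
    assign_work number_workers current_work available_vertices prerequisites
      = assign_work_alt number_workers current_work available_vertices prerequisites := by
  intro hpre
  obtain ⟨hkeys, hlt⟩ := hpre
  have hlen : (PySem.Dict.mk current_work).size = current_work.length := rfl
  set av := PySem.List.sorted (PySem.Set.ofList available_vertices) (fun x => x) false with hav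
  have havnd : av.Nodup :=
    (PySem.List.sorted_ofList_pairwise_lt available_vertices).imp ne_of_lt
  have hmemav : ∀ v ∈ av, v ∈ available_vertices := by
    intro v hv
    have := (PySem.List.mem_sorted (xs := PySem.Set.ofList available_vertices)
      (key := fun x => x) (rev := false) (x := v)).mp hv
    exact (PySem.Set.mem_ofList _ _).mp this
  unfold assign_work assign_work_alt
  rw [← hav]
  by_cases hfull : ((PySem.Dict.mk current_work).size : Int) = number_workers
  · -- both early returns fire
    rw [if_pos hfull, if_pos (by rw [← hlen] at *; exact hfull)]
  · rw [if_neg hfull, if_neg (by rw [← hlen] at *; exact hfull)]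
    by_cases hcap : ((PySem.Dict.mk current_work).size : Int) < number_workers
    · -- free workers: A's loop assigns exactly B's taken slice
      have hlt' := hlt (by rw [← hlen] at *; omega)
      rw [pvLoopEq number_workers (PySem.Dict.mk prerequisites) av (PySem.Dict.mk current_work) av
        havnd (fun v hv hready => (hlt' v (hmemav v hv) (by
          rcases h : (PySem.Dict.mk prerequisites).get? v with _ | l
          · exact absurd (hkeys (by rw [← hlen] at *; omega) v (hmemav v hv)) (by simp [h])
          · cases l with
            | nil => rfl
            | cons a t => simp [h] at hready)).2)]
      rw [pvFoldRemoveEqFilter _ _ havnd]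
      simp only [hlen]
    · -- more work than workers: A's loop is a no-op, B's slice is empty
      have hslots : (max 0 (number_workers - (current_work.length : Int))).toNat = 0 := by
        rw [← hlen] at *; omega
      rw [pvLoopFull number_workers (PySem.Dict.mk prerequisites) av _ _ hcap, hslots]
      simp

-- ===== VERDICT (by name: the statement is the Claim_ definition above) =====
theorem assign_work_spec : Claim_equal_assign_work := by
  intro nw cw av pr _ hpre
  exact assign_work_spec_aux nw cw av pr hpre
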